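-- pv_equiv track=rewrite | github.com/pypi-data/pypi-mirror-398 | packages/slrquerytester/slrquerytester-0.2.1-py3-none-any.whl/slrquerytester/connectors/base_connector.py | _is_fully_braced
-- ===== SOURCE A (Python) =====
-- def _is_fully_braced(name: str) -> bool:
--     """
--     Check if a name is enclosed in balanced braces, e.g. '{Barnes and Noble, Inc.}'.
--     A minimal approach:
--       - name must start with '{' and end with '}'
--       - attempt to verify braces are balanced within.
--     """
--     name = name.strip()
--     if not (name.startswith('{') and name.endswith('}')):
--         return False
--
--     # Do a quick balanced-brace check:
--     # Remove the first and last brace, then see if the remainder is balanced.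
--     inner = name[1:-1]
--     brace_count = 0
--     for char in inner:
--         if char == '{':
--             brace_count += 1
--         elif char == '}':
--             brace_count -= 1
--         if brace_count < 0:
--             # We closed more braces than opened
--             return False
--
--     # If we end up with brace_count=0, then it's properly balanced
--     return brace_count == 0
-- ===== SOURCE B (Python) =====
-- def _is_fully_braced(name: str) -> bool:
--     """Stack-based brace matcher: push the index of each '{', pop on '}',
--     and record where the brace opened at index 0 finds its partner; the
--     string is fully braced iff that partner is the final character."""
--     s = name.strip()
--     if not s:
--         return False
--     stack = []
--     outer_close = -1
--     for i, ch in enumerate(s):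
--         if ch == '{':
--             stack.append(i)
--         elif ch == '}':
--             if not stack:
--                 return False
--             if stack.pop() == 0:
--                 outer_close = i
--     return not stack and outer_close == len(s) - 1
-- ===== Notes on version B (the rewrite author's own statement) =====
-- stated objective: alternative
-- what changed: B replaces A's startswith/endswith guard plus a counter scan of the sliced inner substring by a stack-based brace matcher: it pushes the index of every '{', pops on '}', records where the opening brace at index 0 finds its matching '}', and accepts iff that partner is the final character and the stack empties.
import Mathlib
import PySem

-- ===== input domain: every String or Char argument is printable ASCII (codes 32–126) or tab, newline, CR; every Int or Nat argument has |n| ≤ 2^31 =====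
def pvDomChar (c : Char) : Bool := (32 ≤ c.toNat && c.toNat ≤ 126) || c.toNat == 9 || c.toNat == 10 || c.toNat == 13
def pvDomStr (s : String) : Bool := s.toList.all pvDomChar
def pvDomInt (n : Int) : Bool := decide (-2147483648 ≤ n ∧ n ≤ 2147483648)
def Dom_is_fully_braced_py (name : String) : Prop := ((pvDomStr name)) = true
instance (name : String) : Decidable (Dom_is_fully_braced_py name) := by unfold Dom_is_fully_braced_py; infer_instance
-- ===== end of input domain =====

-- B replaces A's startswith/endswith guard plus a counter scan of the sliced inner substring by a
-- stack-based brace matcher: push the index of each '{', pop on '}', record where the brace that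
-- opened at index 0 finds its partner; accept iff that partner is the final character
-- (objective: alternative algorithm/data structure, same O(n) cost).

-- ===== PORT A =====
-- for char in inner: update brace_count, early return False if it goes negative; finally brace_count == 0
def pvALoop : List Char → Int → Bool
  | [], c => c == 0
  | ch :: t, c =>
    let c' := if ch = '{' then c + 1 else if ch = '}' then c - 1 else c
    if c' < 0 then false else pvALoop t c'

def is_fully_braced_py (name : String) : Bool :=
  let s := PySem.Str.strip name
  if PySem.Str.startswith s "{" && PySem.Str.endswith s "}" then
    pvALoop (PySem.Str.slice s (some 1) (some (-1))).toList 0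
  else
    false

-- ===== PORT B =====
-- for i, ch in enumerate(s): push i on '{'; on '}' return False if the stack is empty, else pop,
-- and when the popped index is 0 record outer_close := i; none models the early 'return False'
def pvBStack : List Char → Int → List Int → Int → Option (List Int × Int)
  | [], _, st, oc => some (st, oc)
  | ch :: t, i, st, oc =>
    if ch = '{' then pvBStack t (i + 1) (i :: st) oc
    else if ch = '}' then
      match st with
      | [] => none
      | j :: st' => pvBStack t (i + 1) st' (if j = 0 then i else oc)
    else pvBStack t (i + 1) st oc

def is_fully_braced_py_alt (name : String) : Bool :=
  let l := (PySem.Str.strip name).toList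
  if l.isEmpty then false
  else
    match pvBStack l 0 [] (-1) with
    | none => false
    | some (st, oc) => st.isEmpty && (oc == (l.length : Int) - 1)

-- ===== PRECONDITION & SPEC =====
def Spec_is_fully_braced_py (name : String) (out : Bool) : Prop := out = is_fully_braced_py_alt name
instance (name : String) (out : Bool) : Decidable (Spec_is_fully_braced_py name out) := by unfold Spec_is_fully_braced_py; infer_instance

-- ===== CLAIM (what is proved, stated in full; the proofs are below) =====
def Claim_equal_is_fully_braced_py : Prop := ∀ (name : String), Dom_is_fully_braced_py name → Spec_is_fully_braced_py name (is_fully_braced_py name)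

-- ===== LEMMAS AND PROOFS =====

-- proof-only intermediate: a depth scan starting at depth d that must stay positive until the end
def pvDepth : List Char → Int → Bool
  | [], d => d == 0
  | ch :: t, d =>
    let d' := if ch = '{' then d + 1 else if ch = '}' then d - 1 else d
    if d' == 0 && !t.isEmpty then false else pvDepth t d'

def pvFin (r : Option (List Int × Int)) (L : Int) : Bool :=
  match r with
  | none => false
  | some (st, oc) => st.isEmpty && (oc == L)

theorem pvGetLast?_cons (c : Char) (t : List Char) (h : t ≠ []) :
    (c :: t).getLast? = t.getLast? := by
  cases h' : t.getLast? with
  | none => exact absurd (List.getLast?_eq_none_iff.mp h') h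
  | some x => simp [List.getLast?_cons, h']

theorem pvLoop_eq (t : List Char) : ∀ c : Int, 0 ≤ c →
    pvDepth t (c + 1) = ((t.getLast? == some '}') && pvALoop t.dropLast c) := by
  induction t with
  | nil =>
    intro c hc
    have h2 : (c + 1 == 0) = false := by simp; omega
    simp [pvDepth, h2]
  | cons ch t ih =>
    intro c hc
    rcases eq_or_ne t [] with rfl | ht
    · by_cases h1 : ch = '{'
      · subst h1
        have h2 : (c + 1 + 1 == 0) = false := by simp; omega
        simp [pvDepth, pvALoop, h2]
      · by_cases h2 : ch = '}'
        · subst h2; simp [pvDepth, pvALoop]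
        · have h3 : (c + 1 == 0) = false := by simp; omega
          simp [pvDepth, pvALoop, h1, h2, h3]
    · have hne : t.isEmpty = false := by simp [ht]
      have hlast := pvGetLast?_cons ch t ht
      have hdrop := List.dropLast_cons_of_ne_nil (x := ch) ht
      rw [hlast, hdrop]
      by_cases h1 : ch = '{'
      · subst h1
        have h2 : (c + 1 + 1 == 0) = false := by simp; omega
        have h3 : ¬ (c + 1 < 0) := by omega
        simp [pvDepth, pvALoop, hne, h2, h3]
        simpa using ih (c + 1) (by omega)
      · by_cases h2 : ch = '}'
        · subst h2
          rcases eq_or_lt_of_le hc with rfl | hpos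
          · simp [pvDepth, pvALoop, hne]
          · have h4' : (c == 0) = false := by simp; omega
            have h5 : ¬ (c - 1 < 0) := by omega
            simp [pvDepth, pvALoop, hne, h4', h5]
            have := ih (c - 1) (by omega)
            rw [sub_add_cancel] at this
            simpa using this
        · have h3 : (c + 1 == 0) = false := by simp; omega
          have h4 : ¬ (c < 0) := by omega
          simp [pvDepth, pvALoop, h1, h2, hne, h3, h4]
          simpa using ih c hc

theorem pvOcConst (t : List Char) : ∀ (i : Int) (st : List Int) (oc : Int), 1 ≤ i →
    (∀ x ∈ st, 0 < x) →
    pvBStack t i st oc = none ∨ ∃ st', pvBStack t i st oc = some (st', oc) := by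
  induction t with
  | nil => intro i st oc _ _; exact Or.inr ⟨st, rfl⟩
  | cons ch t ih =>
    intro i st oc hi hpos
    by_cases h1 : ch = '{'
    · subst h1
      have hp : ∀ x ∈ i :: st, 0 < x := by
        intro x hx; rcases List.mem_cons.mp hx with rfl | hx
        · omega
        · exact hpos x hx
      simpa only [pvBStack, reduceIte] using ih (i + 1) (i :: st) oc (by omega) hp
    · by_cases h2 : ch = '}'
      · subst h2
        cases st with
        | nil => simp [pvBStack]
        | cons j st' =>
          have hj : ¬ (j = 0) := by have := hpos j (by simp); omega
          simpa only [pvBStack, reduceIte, if_neg hj] using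
            ih (i + 1) st' oc (by omega) (fun x hx => hpos x (by simp [hx]))
      · simpa only [pvBStack, if_neg h1, if_neg h2] using ih (i + 1) st oc (by omega) hpos

theorem pvStack_eq_depth (t : List Char) : ∀ (i : Int) (st₀ : List Int), 1 ≤ i →
    (∀ x ∈ st₀, 0 < x) →
    pvFin (pvBStack t i (st₀ ++ [0]) (-1)) (i + (t.length : Int) - 1)
    = pvDepth t ((st₀.length : Int) + 1) := by
  induction t with
  | nil =>
    intro i st₀ hi hpos
    have h2 : (((st₀.length : Int) + 1) == 0) = false := by simp; omega
    simp [pvBStack, pvFin, pvDepth, h2]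
  | cons ch t ih =>
    intro i st₀ hi hpos
    have hL : i + (((ch :: t).length : Int)) - 1 = (i + 1) + (t.length : Int) - 1 := by
      push_cast [List.length_cons]; ring
    rw [hL]
    by_cases h1 : ch = '{'
    · subst h1
      have hp : ∀ x ∈ i :: st₀, 0 < x := by
        intro x hx; rcases List.mem_cons.mp hx with rfl | hx
        · omega
        · exact hpos x hx
      have IH := ih (i + 1) (i :: st₀) (by omega) hp
      have hc : (((i :: st₀).length : Int) + 1) = ((st₀.length : Int) + 1) + 1 := by
        push_cast [List.length_cons]; ring
      rw [hc] at IH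
      have bstep : pvBStack ('{' :: t) i (st₀ ++ [0]) (-1)
          = pvBStack t (i + 1) ((i :: st₀) ++ [0]) (-1) := by simp [pvBStack]
      have hg : ((((st₀.length : Int) + 1) + 1) == 0) = false := by simp; omega
      have dstep : pvDepth ('{' :: t) ((st₀.length : Int) + 1)
          = pvDepth t (((st₀.length : Int) + 1) + 1) := by simp [pvDepth, hg]
      rw [bstep, dstep, IH]
    · by_cases h2 : ch = '}'
      · subst h2
        cases st₀ with
        | nil =>
          have bstep : pvBStack ('}' :: t) i (([] : List Int) ++ [0]) (-1)
              = pvBStack t (i + 1) [] i := by simp [pvBStack]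
          rw [bstep]
          cases t with
          | nil => simp [pvBStack, pvFin, pvDepth]
          | cons d u =>
            have dstep : pvDepth ('}' :: d :: u) ((([] : List Int).length : Int) + 1) = false := by
              simp [pvDepth]
            rw [dstep]
            rcases pvOcConst (d :: u) (i + 1) [] i (by omega) (by simp) with hn | ⟨st', hs⟩
            · simp [pvFin, hn]
            · simp [pvFin, hs]
              intro _
              omega
        | cons j st₀' =>
          have hj : ¬ (j = 0) := by have := hpos j (by simp); omega
          have IH := ih (i + 1) st₀' (by omega) (fun x hx => hpos x (by simp [hx]))
          have bstep : pvBStack ('}' :: t) i ((j :: st₀') ++ [0]) (-1)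
              = pvBStack t (i + 1) (st₀' ++ [0]) (-1) := by simp [pvBStack, hj]
          have hg : (((st₀'.length : Int) + 1) == 0) = false := by simp; omega
          have dstep : pvDepth ('}' :: t) (((j :: st₀').length : Int) + 1)
              = pvDepth t ((st₀'.length : Int) + 1) := by simp [pvDepth, hg]
          rw [bstep, IH, dstep]
      · have IH := ih (i + 1) st₀ (by omega) hpos
        have bstep : pvBStack (ch :: t) i (st₀ ++ [0]) (-1)
            = pvBStack t (i + 1) (st₀ ++ [0]) (-1) := by simp [pvBStack, h1, h2]
        have hg : (((st₀.length : Int) + 1) == 0) = false := by simp; omega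
        have dstep : pvDepth (ch :: t) ((st₀.length : Int) + 1)
            = pvDepth t ((st₀.length : Int) + 1) := by simp [pvDepth, h1, h2, hg]
        rw [bstep, dstep, IH]

theorem pvSlice_inner (c : Char) (t : List Char) :
    PySem.List.slice (c :: t) (some 1) (some (-1)) = t.dropLast := by
  simp [PySem.List.slice, PySem.List.clampIdx, List.dropLast_eq_take]
  rw [if_neg (by omega)]
  omega

theorem pvEnds (l : List Char) : PySem.Chars.endswith l ['}'] = (l.getLast? == some '}') := by
  rcases List.eq_nil_or_concat l with rfl | ⟨u, x, rfl⟩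
  · decide
  · rw [Bool.eq_iff_iff]
    simp [PySem.Chars.endswith_iff]
    constructor
    · intro h
      have := h.getLast (by simp)
      simpa using this.symm
    · rintro rfl
      exact List.suffix_append u ['}']

-- ===== VERDICT (by name: the statement is the Claim_ definition above) =====
theorem is_fully_braced_py_spec : Claim_equal_is_fully_braced_py := by
  intro name _
  unfold Spec_is_fully_braced_py
  unfold is_fully_braced_py is_fully_braced_py_alt
  simp only [PySem.Str.startswith_eq, PySem.Str.endswith_eq, PySem.Str.toList_slice,
    PySem.Chars.slice_eq_listSlice]
  have hb : ("{" : String).toList = ['{'] := rfl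
  have he : ("}" : String).toList = ['}'] := rfl
  rw [hb, he]
  generalize (PySem.Str.strip name).toList = l
  cases l with
  | nil => decide
  | cons c t =>
    rw [pvSlice_inner, pvEnds]
    have hstep : (match pvBStack (c :: t) 0 [] (-1) with
        | none => false
        | some (st, oc) => st.isEmpty && (oc == (((c :: t).length : Int)) - 1))
        = pvFin (pvBStack (c :: t) 0 [] (-1)) ((((c :: t).length : Int)) - 1) := rfl
    by_cases h1 : c = '{'
    · subst h1
      rw [show PySem.Chars.startswith ('{' :: t) ['{'] = true from by
            rw [Bool.eq_iff_iff]; simp [PySem.Chars.startswith_iff]]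
      have hmain := pvStack_eq_depth t 1 [] (by omega) (by simp)
      simp only [List.nil_append, List.length_nil, Nat.cast_zero, zero_add] at hmain
      have hlem := pvLoop_eq t 0 le_rfl
      norm_num at hlem
      simp only [List.isEmpty_cons, Bool.false_eq_true, if_false, hstep, Bool.true_and]
      rw [show pvBStack ('{' :: t) 0 [] (-1) = pvBStack t 1 [0] (-1) from by simp [pvBStack]]
      rw [show ((('{' :: t).length : Int)) - 1 = 1 + (t.length : Int) - 1 from by
            push_cast [List.length_cons]; ring]
      rw [hmain, hlem]
      rcases eq_or_ne t [] with rfl | ht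
      · decide
      · rw [pvGetLast?_cons '{' t ht]
        cases (t.getLast? == some '}') <;> simp
    · rw [show PySem.Chars.startswith (c :: t) ['{'] = false from by
            rw [Bool.eq_iff_iff]; simp [PySem.Chars.startswith_iff, List.cons_prefix_cons]
            exact fun hh => absurd hh.symm h1]
      simp only [Bool.false_and, if_false, List.isEmpty_cons, Bool.false_eq_true, hstep]
      by_cases h2 : c = '}'
      · subst h2
        rw [show pvBStack ('}' :: t) 0 [] (-1) = none from by simp [pvBStack]]
        simp [pvFin]
      · rw [show pvBStack (c :: t) 0 [] (-1) = pvBStack t 1 [] (-1) from by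
            simp [pvBStack, h1, h2]]
        rcases pvOcConst t 1 [] (-1) (by omega) (by simp) with hn | ⟨st', hs⟩
        · simp [hn, pvFin]
        · simp [hs, pvFin]
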